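-- pv_equiv track=rewrite | github.com/Filimonova-Ekaterina/AiSD_CourseWork_2 | AiSD_CourseWork_2/AiSD_CourseWork_2.py | erdos_strauss_naive
-- ===== SOURCE A (Python) =====
-- def erdos_strauss_naive(n, max_trials=1000):
--     solutions = set()
--     for x in range(1, max_trials + 1):
--         for y in range(x, max_trials + 1):
--             denom = 4 * x * y - n * (x + y)
--             if denom > 0 and (n * x * y) % denom == 0:
--                 z = (n * x * y) // denom
--                 if z >= y:
--                     solutions.add((x, y, z))
--     solutions = sorted(solutions)
--     return solutions[0] if solutions else None
-- ===== SOURCE B (Python) =====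
-- def erdos_strauss_naive(n, max_trials=1000):
--     # Per x: 4/n = 1/x + 1/y + 1/z with x<=y<=z reduces to finding y in the
--     # tight window (q/p, 2q/p] with (p*y - q) | q*y, where p = 4x-n, q = n*x.
--     # Scan x ascending and return on the first hit -> lexicographically least.
--     for x in range(1, max_trials + 1):
--         p = 4 * x - n
--         if p <= 0:
--             continue
--         q = n * x
--         lo = max(x, q // p + 1)
--         hi = min(max_trials, (2 * q) // p)
--         for y in range(lo, hi + 1):
--             d = p * y - q
--             if (q * y) % d == 0:
--                 return (x, y, (q * y) // d)
--     return None
-- ===== Notes on version B (the rewrite author's own statement) =====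
-- stated objective: faster
-- what changed: Instead of enumerating all (x,y) pairs into a set and sorting it, B scans x ascending, derives per x the exact algebraic window (q/p, 2q/p] that y must lie in (p=4x-n, q=nx), and returns the first hit, which is the lexicographic minimum.
import Mathlib
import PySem

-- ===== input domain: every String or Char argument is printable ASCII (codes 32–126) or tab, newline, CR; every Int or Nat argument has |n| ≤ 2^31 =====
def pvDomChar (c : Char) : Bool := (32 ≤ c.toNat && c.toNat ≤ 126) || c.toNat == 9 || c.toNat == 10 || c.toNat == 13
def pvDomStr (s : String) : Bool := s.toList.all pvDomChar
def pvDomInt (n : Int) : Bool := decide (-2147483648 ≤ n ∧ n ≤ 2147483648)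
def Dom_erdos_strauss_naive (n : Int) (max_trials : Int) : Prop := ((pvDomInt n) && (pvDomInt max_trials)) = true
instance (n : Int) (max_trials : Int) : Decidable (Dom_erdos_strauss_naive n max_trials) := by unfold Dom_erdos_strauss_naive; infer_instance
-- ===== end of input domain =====

-- B changes the algorithm: per x it scans only the algebraic window of feasible y and
-- returns the first hit (the lexicographic minimum) instead of collecting and sorting all pairs.

-- ===== PORT A =====
def erdos_strauss_naive (n : Int) (max_trials : Int) : Option (List Int) :=
  let solutions : PySem.Set (List Int) :=
    (PySem.List.pyRange 1 (max_trials + 1) 1).foldl (fun sols x =>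
      (PySem.List.pyRange x (max_trials + 1) 1).foldl (fun sols y =>
        let denom := 4 * x * y - n * (x + y)
        if denom > 0 ∧ PySem.Int.mod (n * x * y) denom = 0 then
          let z := PySem.Int.floordiv (n * x * y) denom
          if z ≥ y then PySem.Set.add sols [x, y, z] else sols
        else sols) sols) PySem.Set.empty
  let sortedSols := PySem.List.sorted solutions (fun v => v) false
  match sortedSols with
  | [] => none
  | v :: _ => some v

-- ===== PORT B =====
def erdos_strauss_naive_alt (n : Int) (max_trials : Int) : Option (List Int) :=
  (PySem.List.pyRange 1 (max_trials + 1) 1).findSome? (fun x =>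
    let p := 4 * x - n
    if p ≤ 0 then none
    else
      let q := n * x
      let lo := max x (PySem.Int.floordiv q p + 1)
      let hi := min max_trials (PySem.Int.floordiv (2 * q) p)
      (PySem.List.pyRange lo (hi + 1) 1).findSome? (fun y =>
        let d := p * y - q
        if PySem.Int.mod (q * y) d = 0 then
          some [x, y, PySem.Int.floordiv (q * y) d]
        else none))

-- ===== PRECONDITION & SPEC =====
def Spec_erdos_strauss_naive (n : Int) (max_trials : Int) (out : Option (List Int)) : Prop := out = erdos_strauss_naive_alt n max_trials
instance (n : Int) (max_trials : Int) (out : Option (List Int)) : Decidable (Spec_erdos_strauss_naive n max_trials out) := by unfold Spec_erdos_strauss_naive; infer_instance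

-- ===== CLAIM (what is proved, stated in full; the proofs are below) =====
def Claim_equal_erdos_strauss_naive : Prop := ∀ (n : Int) (max_trials : Int), Dom_erdos_strauss_naive n max_trials → Spec_erdos_strauss_naive n max_trials (erdos_strauss_naive n max_trials)

-- ===== LEMMAS AND PROOFS =====

-- A's per-(x,y) step as an optional result.
def hitA (n x y : Int) : Option (List Int) :=
  let denom := 4 * x * y - n * (x + y)
  if denom > 0 ∧ PySem.Int.mod (n * x * y) denom = 0 then
    let z := PySem.Int.floordiv (n * x * y) denom
    if z ≥ y then some [x, y, z] else none
  else none

-- B's per-(x,y) step.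
def hitB (n x y : Int) : Option (List Int) :=
  let p := 4 * x - n
  let q := n * x
  let d := p * y - q
  if PySem.Int.mod (q * y) d = 0 then some [x, y, PySem.Int.floordiv (q * y) d] else none

def rowA (n m x : Int) : List (List Int) :=
  (PySem.List.pyRange x (m + 1) 1).filterMap (hitA n x)

def rowB (n m x : Int) : List (List Int) :=
  if 4 * x - n ≤ 0 then []
  else
    let p := 4 * x - n
    let q := n * x
    let lo := max x (PySem.Int.floordiv q p + 1)
    let hi := min m (PySem.Int.floordiv (2 * q) p)
    (PySem.List.pyRange lo (hi + 1) 1).filterMap (hitB n x)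

def hits (n m : Int) : List (List Int) :=
  (PySem.List.pyRange 1 (m + 1) 1).flatMap (rowA n m)

lemma hitA_shape (n x y : Int) (v : List Int) (h : hitA n x y = some v) :
    ∃ z, v = [x, y, z] := by
  simp only [hitA] at h
  split_ifs at h with h1 h2
  · exact ⟨_, (Option.some_injective _ h).symm⟩

-- findSome? = head of the filterMap
lemma findSome?_eq_head_filterMap {α β : Type} (f : α → Option β) (l : List α) :
    l.findSome? f = (l.filterMap f).head? := by
  induction l with
  | nil => rfl
  | cons a t ih =>
    cases h : f a with
    | none => simp only [List.findSome?_cons, List.filterMap_cons, h]; exact ih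
    | some b => simp [h]

lemma findSome?_head_flatMap {α β : Type} (g : α → List β) (l : List α) :
    l.findSome? (fun x => (g x).head?) = (l.flatMap g).head? := by
  induction l with
  | nil => rfl
  | cons a t ih =>
    simp only [List.findSome?_cons, List.flatMap_cons]
    cases h : (g a).head? with
    | none =>
      have hnil : g a = [] := List.head?_eq_none_iff.mp h
      simp [hnil, ih]
    | some b =>
      cases hg : g a with
      | nil => simp [hg] at h
      | cons c u =>
        rw [hg] at h
        simp only [List.head?_cons] at h
        simp [h]

lemma findSome?_congr_mem {α β : Type} (f g : α → Option β) (l : List α)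
    (h : ∀ x ∈ l, f x = g x) : l.findSome? f = l.findSome? g := by
  induction l with
  | nil => rfl
  | cons a t ih =>
    simp only [List.findSome?_cons, h a (by simp)]
    cases g a with
    | none => exact ih (fun x hx => h x (by simp [hx]))
    | some b => rfl

-- B returns the head of the concatenated rows.
lemma alt_eq_head_hitsB (n m : Int) :
    erdos_strauss_naive_alt n m = ((PySem.List.pyRange 1 (m + 1) 1).flatMap (rowB n m)).head? := by
  rw [← findSome?_head_flatMap]
  unfold erdos_strauss_naive_alt
  apply findSome?_congr_mem
  intro x _
  by_cases hp : 4 * x - n ≤ 0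
  · simp [rowB, hp]
  · simp only [rowB, hitB, if_neg hp]
    rw [findSome?_eq_head_filterMap]

-- folding conditional Set.add over a strictly-increasing stream appends the hits
lemma foldl_add_eq_append (g : Int → Option (List Int)) (ys : List Int)
    (s : List (List Int)) (h : (s ++ ys.filterMap g).Pairwise (· < ·)) :
    ys.foldl (fun sols y =>
      match g y with
      | some v => PySem.Set.add sols v
      | none => sols) s = s ++ ys.filterMap g := by
  induction ys generalizing s with
  | nil => simp
  | cons y t ih =>
    rw [List.filterMap_cons] at h
    cases hg : g y with
    | none =>
      rw [hg] at h
      simp only [List.foldl_cons, List.filterMap_cons, hg]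
      exact ih s h
    | some v =>
      rw [hg] at h
      simp only [List.foldl_cons, List.filterMap_cons, hg]
      have hv : v ∉ s := by
        intro hvs
        exact lt_irrefl _ ((List.pairwise_append.mp h).2.2 v hvs v (by simp))
      have hadd : PySem.Set.add s v = s ++ [v] := by
        simp [PySem.Set.add, hv]
      rw [hadd]
      simpa using ih (s ++ [v]) (by simpa using h)

-- A's inner loop body is the conditional-add on hitA
lemma bodyA_eq (n x : Int) :
    (fun (sols : PySem.Set (List Int)) (y : Int) =>
      let denom := 4 * x * y - n * (x + y)
      if denom > 0 ∧ PySem.Int.mod (n * x * y) denom = 0 then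
        let z := PySem.Int.floordiv (n * x * y) denom
        if z ≥ y then PySem.Set.add sols [x, y, z] else sols
      else sols)
    = (fun sols y =>
      match hitA n x y with
      | some v => PySem.Set.add sols v
      | none => sols) := by
  funext sols y
  by_cases h1 : 4 * x * y - n * (x + y) > 0 ∧
      PySem.Int.mod (n * x * y) (4 * x * y - n * (x + y)) = 0 <;>
    by_cases h2 : PySem.Int.floordiv (n * x * y) (4 * x * y - n * (x + y)) ≥ y <;>
    simp [hitA, h1, h2] <;> (try (split_ifs <;> rfl))

-- the whole double loop accumulates exactly `hits`
lemma foldl_outer_eq_append (n m : Int) (xs : List Int) (s : List (List Int))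
    (h : (s ++ xs.flatMap (rowA n m)).Pairwise (· < ·)) :
    xs.foldl (fun sols x =>
      (PySem.List.pyRange x (m + 1) 1).foldl (fun sols y =>
        let denom := 4 * x * y - n * (x + y)
        if denom > 0 ∧ PySem.Int.mod (n * x * y) denom = 0 then
          let z := PySem.Int.floordiv (n * x * y) denom
          if z ≥ y then PySem.Set.add sols [x, y, z] else sols
        else sols) sols) s = s ++ xs.flatMap (rowA n m) := by
  induction xs generalizing s with
  | nil => simp
  | cons x t ih =>
    rw [List.flatMap_cons] at h
    simp only [List.foldl_cons, List.flatMap_cons]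
    rw [bodyA_eq n x]
    have hrow : (s ++ rowA n m x).Pairwise (· < ·) := by
      apply List.Pairwise.sublist _ h
      rw [← List.append_assoc]
      exact List.sublist_append_left _ _
    rw [foldl_add_eq_append (hitA n x) _ s hrow]
    simpa using ih (s ++ rowA n m x) (by simpa using h)

-- `hits` is strictly increasing in the lexicographic list order
lemma hits_pairwise (n m : Int) : (hits n m).Pairwise (· < ·) := by
  unfold hits
  rw [List.pairwise_flatMap]
  constructor
  · intro x _
    unfold rowA
    rw [List.pairwise_filterMap]
    apply (PySem.List.pairwise_lt_pyRange_one x (m + 1)).imp_of_mem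
    intro y y' _ _ hlt v hv v' hv'
    obtain ⟨z, rfl⟩ := hitA_shape n x y v hv
    obtain ⟨z', rfl⟩ := hitA_shape n x y' v' hv'
    exact List.Lex.cons (List.Lex.rel hlt)
  · apply (PySem.List.pairwise_lt_pyRange_one 1 (m + 1)).imp_of_mem
    intro x x' _ _ hlt v hv v' hv'
    unfold rowA at hv hv'
    obtain ⟨y, -, hy⟩ := List.mem_filterMap.mp hv
    obtain ⟨y', -, hy'⟩ := List.mem_filterMap.mp hv'
    obtain ⟨z, rfl⟩ := hitA_shape n x y v hy
    obtain ⟨z', rfl⟩ := hitA_shape n x' y' v' hy'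
    exact List.Lex.rel hlt

-- A returns the head of `hits`
lemma a_eq_head_hits (n m : Int) :
    erdos_strauss_naive n m = (hits n m).head? := by
  unfold erdos_strauss_naive
  have hsols : (PySem.List.pyRange 1 (m + 1) 1).foldl (fun sols x =>
      (PySem.List.pyRange x (m + 1) 1).foldl (fun sols y =>
        let denom := 4 * x * y - n * (x + y)
        if denom > 0 ∧ PySem.Int.mod (n * x * y) denom = 0 then
          let z := PySem.Int.floordiv (n * x * y) denom
          if z ≥ y then PySem.Set.add sols [x, y, z] else sols
        else sols) sols) (PySem.Set.empty) = hits n m := by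
    have := foldl_outer_eq_append n m (PySem.List.pyRange 1 (m + 1) 1) []
      (by simpa using hits_pairwise n m)
    simpa [PySem.Set.empty, hits] using this
  simp only [hsols]
  have hsorted : PySem.List.sorted (hits n m) (fun v => v) false = hits n m := by
    have := PySem.List.sorted_eq_of_perm_of_pairwise_lt (hits n m) (hits n m) (fun v => v)
      (List.Perm.refl _) (hits_pairwise n m)
    convert this using 2
  rw [hsorted]
  cases hits n m <;> rfl

-- window-restriction: filterMap of a windowed function over the full range
lemma filterMap_window {β : Type} (g : Int → Option β) (a b lo hi : Int)
    (hal : a ≤ lo) (hhb : hi < b) :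
    (PySem.List.pyRange a b 1).filterMap (fun y => if lo ≤ y ∧ y ≤ hi then g y else none)
      = (PySem.List.pyRange lo (hi + 1) 1).filterMap g := by
  by_cases hle : lo ≤ hi + 1
  · rw [PySem.List.pyRange_one_append a lo b hal (by omega),
        PySem.List.pyRange_one_append lo (hi + 1) b hle (by omega),
        List.filterMap_append, List.filterMap_append]
    have h1 : (PySem.List.pyRange a lo 1).filterMap
        (fun y => if lo ≤ y ∧ y ≤ hi then g y else none) = [] := by
      rw [List.filterMap_eq_nil_iff]
      intro y hy
      have := PySem.List.mem_pyRange_one.mp hy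
      rw [if_neg (by omega)]
    have h3 : (PySem.List.pyRange (hi + 1) b 1).filterMap
        (fun y => if lo ≤ y ∧ y ≤ hi then g y else none) = [] := by
      rw [List.filterMap_eq_nil_iff]
      intro y hy
      have := PySem.List.mem_pyRange_one.mp hy
      rw [if_neg (by omega)]
    have h2 : (PySem.List.pyRange lo (hi + 1) 1).filterMap
        (fun y => if lo ≤ y ∧ y ≤ hi then g y else none)
        = (PySem.List.pyRange lo (hi + 1) 1).filterMap g := by
      apply List.filterMap_congr
      intro y hy
      have := PySem.List.mem_pyRange_one.mp hy
      rw [if_pos (by omega)]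
    rw [h1, h2, h3, List.nil_append, List.append_nil]
  · rw [PySem.List.pyRange_one_eq_nil (by omega : hi + 1 ≤ lo), List.filterMap_nil]
    rw [List.filterMap_eq_nil_iff]
    intro y hy
    rw [if_neg (by omega)]

-- the arithmetic core: for y in A's range, A's test is B's test inside the window
lemma hitA_eq_window (n x y : Int) (hx : 1 ≤ x) (hxy : x ≤ y) (hym : y ≤ m)
    (hp : 0 < 4 * x - n) :
    hitA n x y =
      if max x (PySem.Int.floordiv (n * x) (4 * x - n) + 1) ≤ y ∧
         y ≤ min m (PySem.Int.floordiv (2 * (n * x)) (4 * x - n)) then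
        hitB n x y
      else none := by
  set p := 4 * x - n with hpdef
  set q := n * x with hqdef
  have hdenom : 4 * x * y - n * (x + y) = p * y - q := by rw [hpdef, hqdef]; ring
  set d := p * y - q with hddef
  have hy1 : 1 ≤ y := le_trans hx hxy
  have hlo_iff : PySem.Int.floordiv q p + 1 ≤ y ↔ 0 < d := by
    have := PySem.Int.floordiv_lt_iff_lt_mul (a := q) (b := p) (q := y) hp
    constructor
    · intro h; have : q < y * p := this.mp (by omega); rw [hddef]; nlinarith
    · intro h; have : q < y * p := by rw [hddef] at h; nlinarith
      omega
  have hhi_iff : y ≤ PySem.Int.floordiv (2 * q) p ↔ p * y ≤ 2 * q := by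
    have := PySem.Int.le_floordiv_iff_mul_le (a := 2 * q) (b := p) (q := y) hp
    constructor
    · intro h; nlinarith [this.mp h]
    · intro h; exact this.mpr (by nlinarith)
  unfold hitA hitB
  simp only [hdenom, ← hddef, ← hpdef, ← hqdef]
  by_cases h1 : 0 < d
  · by_cases h2 : PySem.Int.mod (q * y) d = 0
    · obtain ⟨k, hk⟩ := (PySem.Int.mod_eq_zero_iff_dvd (q * y) d).mp h2
      have hz : PySem.Int.floordiv (q * y) d = k := by
        rw [PySem.Int.floordiv_eq_ediv_of_pos h1, hk]
        exact Int.mul_ediv_cancel_left k (ne_of_gt h1)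
      have hz_iff : k ≥ y ↔ d ≤ q := by
        constructor
        · intro h
          have hdk : d * y ≤ d * k := by exact mul_le_mul_of_nonneg_left h (le_of_lt h1)
          rw [← hk] at hdk
          nlinarith
        · intro h
          have : d * y ≤ q * y := by nlinarith
          rw [hk] at this
          nlinarith
      have hwin_iff : (max x (PySem.Int.floordiv q p + 1) ≤ y ∧
          y ≤ min m (PySem.Int.floordiv (2 * q) p)) ↔ d ≤ q := by
        rw [max_le_iff, le_min_iff, hhi_iff]
        constructor
        · intro ⟨_, _, hle⟩; rw [hddef] at *; omega
        · intro h
          refine ⟨⟨hxy, hlo_iff.mpr h1⟩, hym, by rw [hddef] at *; omega⟩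
      by_cases h3 : d ≤ q
      · rw [if_pos (hwin_iff.mpr h3), if_pos ⟨h1, h2⟩, if_pos h2, hz,
          if_pos (hz_iff.mpr h3)]
      · rw [if_neg (fun hw => h3 (hwin_iff.mp hw)), if_pos ⟨h1, h2⟩, hz,
          if_neg (fun hzy => h3 (hz_iff.mp hzy))]
    · rw [if_neg (fun hc => h2 hc.2)]
      simp [h2]
  · rw [if_neg (fun hc => h1 hc.1)]
    rw [if_neg]
    intro ⟨hlo, _⟩
    exact h1 (hlo_iff.mp (le_trans (le_max_right _ _) hlo))

-- the rows coincide
lemma rowA_eq_rowB (n m x : Int) (hx : 1 ≤ x) : rowA n m x = rowB n m x := by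
  unfold rowA rowB
  by_cases hp : 4 * x - n ≤ 0
  · rw [if_pos hp, List.filterMap_eq_nil_iff]
    intro y hy
    have hy' := PySem.List.mem_pyRange_one.mp hy
    unfold hitA
    rw [if_neg]
    intro ⟨h1, _⟩
    nlinarith [h1]
  · rw [if_neg hp]
    push Not at hp
    have h1 : (PySem.List.pyRange x (m + 1) 1).filterMap (hitA n x)
        = (PySem.List.pyRange x (m + 1) 1).filterMap
          (fun y => if max x (PySem.Int.floordiv (n * x) (4 * x - n) + 1) ≤ y ∧
              y ≤ min m (PySem.Int.floordiv (2 * (n * x)) (4 * x - n)) then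
            hitB n x y else none) := by
      apply List.filterMap_congr
      intro y hy
      have hy' := PySem.List.mem_pyRange_one.mp hy
      exact hitA_eq_window n x y hx hy'.1 (by omega) (by omega)
    rw [h1]
    exact filterMap_window (hitB n x) x (m + 1)
      (max x (PySem.Int.floordiv (n * x) (4 * x - n) + 1))
      (min m (PySem.Int.floordiv (2 * (n * x)) (4 * x - n)))
      (le_max_left _ _) (by omega)

-- ===== VERDICT (by name: the statement is the Claim_ definition above) =====
theorem erdos_strauss_naive_spec : Claim_equal_erdos_strauss_naive := by
  intro n m _
  unfold Spec_erdos_strauss_naive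
  rw [a_eq_head_hits, alt_eq_head_hitsB]
  unfold hits
  congr 1
  apply List.flatMap_congr
  intro x hx
  exact rowA_eq_rowB n m x (PySem.List.mem_pyRange_one.mp hx).1
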